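-- pv_equiv track=rewrite | github.com/seongjaee/algorithm-study | Codes/Programmers/과일장수.py | solution
-- ===== SOURCE A (Python) =====
-- def solution(k, m, score):
--     answer = 0
--     score.sort()
--     while len(score) >= m:
--         min_value = k
--         for _ in range(m):
--             min_value = min(min_value, score.pop())
--         answer += min_value * m
--
--     return answer
-- ===== SOURCE B (Python) =====
-- def solution(k, m, score):
--     # Sort once; group j (0-based, from the top) of the m largest remaining
--     # elements has its minimum at index n - (j+1)*m of the ascending list,
--     # so pick it directly instead of popping and scanning.
--     s = sorted(score)
--     n = len(s)
--     return m * sum(min(k, s[n - (j + 1) * m]) for j in range(n // m))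
-- ===== Notes on version B (the rewrite author's own statement) =====
-- stated objective: faster
-- what changed: Replaces A's destructive while-loop (repeatedly popping m elements one by one and scanning for their minimum) with a single pass that picks each group's minimum directly by index in the sorted list (constant-factor win: no per-element pops or min-scans); B does not mutate the input list (A sorts and empties it), the equivalence is about the return value.
import Mathlib
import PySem

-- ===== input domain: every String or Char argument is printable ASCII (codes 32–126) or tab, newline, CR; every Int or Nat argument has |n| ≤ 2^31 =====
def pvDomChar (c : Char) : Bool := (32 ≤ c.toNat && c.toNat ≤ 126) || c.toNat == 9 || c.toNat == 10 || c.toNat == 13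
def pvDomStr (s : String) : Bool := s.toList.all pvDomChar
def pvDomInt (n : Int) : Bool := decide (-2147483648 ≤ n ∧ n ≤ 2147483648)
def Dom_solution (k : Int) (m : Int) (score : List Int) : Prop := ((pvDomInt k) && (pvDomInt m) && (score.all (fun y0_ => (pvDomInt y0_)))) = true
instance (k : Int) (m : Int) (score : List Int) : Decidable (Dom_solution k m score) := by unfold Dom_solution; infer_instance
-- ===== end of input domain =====

-- B replaces A's destructive pop-and-scan while-loop by direct indexed selection of each
-- group's minimum from the sorted list (objective: simpler). A sorts and empties its
-- argument list in place; B does not mutate it — the equivalence proved is about the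
-- return value only.

-- ===== PORT A =====
-- inner 'for _ in range(m): min_value = min(min_value, score.pop())'
-- (the 'none' branch is where Python's pop() would raise IndexError on an empty list;
-- it is unreachable while len(score) ≥ m, which is the only way A calls this loop)
def popLoopA : Nat → List Int → Int → Int × List Int
  | 0, s, mv => (mv, s)
  | c+1, s, mv =>
    match PySem.List.pop? s with
    | some (x, s') => popLoopA c s' (min mv x)
    | none => (mv, s)

-- the 'while len(score) >= m' loop; fuel = initial length + 1 bounds the iterations
-- (each executed iteration with 1 ≤ m removes m elements, see Pre_solution)
def whileA (k : Int) (m : Int) : Nat → List Int → Int → Int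
  | 0, _, ans => ans
  | fuel+1, s, ans =>
    if m ≤ (s.length : Int) then
      let r := popLoopA m.toNat s k
      whileA k m fuel r.2 (ans + r.1 * m)
    else ans

def solution (k : Int) (m : Int) (score : List Int) : Int :=
  whileA k m (score.length + 1) (PySem.List.sorted score (fun x => x)) 0

-- ===== PORT B =====
def solution_alt (k : Int) (m : Int) (score : List Int) : Int :=
  let s := PySem.List.sorted score (fun x => x)
  let n : Int := s.length
  m * ((PySem.List.pyRange 0 (PySem.Int.floordiv n m)).foldl
        (fun acc j => acc + min k ((PySem.List.pyGet? s (n - (j + 1) * m)).getD 0)) 0)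

-- ===== PRECONDITION & SPEC =====
-- When m ≤ 0 the Python A never returns: 'while len(score) >= m' is always true and
-- 'range(m)' pops nothing, so the loop runs forever. Pre_ excludes exactly those inputs.
def Pre_solution (k : Int) (m : Int) (score : List Int) : Prop := 1 ≤ m
instance (k : Int) (m : Int) (score : List Int) : Decidable (Pre_solution k m score) := by unfold Pre_solution; infer_instance
def pvWitness_solution : Int × Int × List Int := (5, 2, [1, 2, 3, 4])

def Spec_solution (k : Int) (m : Int) (score : List Int) (out : Int) : Prop := out = solution_alt k m score
instance (k : Int) (m : Int) (score : List Int) (out : Int) : Decidable (Spec_solution k m score out) := by unfold Spec_solution; infer_instance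

-- ===== CLAIM (what is proved, stated in full; the proofs are below) =====
def Claim_equal_solution : Prop := ∀ (k : Int) (m : Int) (score : List Int), Dom_solution k m score → Pre_solution k m score → Spec_solution k m score (solution k m score)

-- ===== LEMMAS AND PROOFS =====

-- the list of group minimums B sums (j-th group's minimum, read off the ascending list)
def gterms (k : Int) (m : Int) (s : List Int) : List Int :=
  (List.range (PySem.Int.floordiv (s.length : Int) m).toNat).map
    (fun (j : Nat) => min k ((PySem.List.pyGet? s ((s.length : Int) - ((j : Int) + 1) * m)).getD 0))

lemma alt_eq_gterms (k m : Int) (score : List Int) (hm : 1 ≤ m) :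
    solution_alt k m score = m * (gterms k m (PySem.List.sorted score (fun x => x))).sum := by
  have hg0 : 0 ≤ PySem.Int.floordiv ((PySem.List.sorted score (fun x => x)).length : Int) m := by
    rw [PySem.Int.floordiv_eq_ediv_of_pos (by omega)]
    exact Int.ediv_nonneg (by positivity) (by omega)
  simp only [solution_alt, gterms]
  rw [← Int.toNat_of_nonneg hg0, PySem.List.pyRange_zero_natCast, List.foldl_map,
    PySem.List.foldl_add, Int.toNat_natCast]
  simp only [zero_add, PySem.List.length_sorted]

lemma popLoopA_eq (c : Nat) (s : List Int) (mv : Int)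
    (hp : s.Pairwise (· ≤ ·)) (hc : 0 < c) (hlen : c ≤ s.length) :
    popLoopA c s mv = (min mv (s.getD (s.length - c) 0), s.take (s.length - c)) := by
  induction c generalizing s mv with
  | zero => omega
  | succ c ih =>
    have hne : s ≠ [] := by rintro rfl; simp at hlen
    obtain ⟨t, x, rfl⟩ : ∃ t x, s = t ++ [x] :=
      ⟨s.dropLast, s.getLast hne, (List.dropLast_append_getLast hne).symm⟩
    have hlenx : (t ++ [x]).length = t.length + 1 := by simp
    simp only [popLoopA, PySem.List.pop?_last]
    have hsub : (t ++ [x]).length - (c + 1) = t.length - c := by omega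
    rcases Nat.eq_zero_or_pos c with h0 | hpos
    · subst h0
      simp only [popLoopA]
      rw [hsub, Nat.sub_zero, List.getD_eq_getElem _ _ (by omega),
        List.getElem_concat_length, List.take_left]
      rfl
    · have hpt := List.pairwise_append.mp hp
      rw [ih t (min mv x) hpt.1 hpos (by omega)]
      have hgd : (t ++ [x]).getD (t.length - c) 0 = t.getD (t.length - c) 0 := by
        rw [List.getD_eq_getElem _ _ (by omega), List.getD_eq_getElem _ _ (by omega),
          List.getElem_append_left (by omega)]
      have hle : t.getD (t.length - c) 0 ≤ x := by
        rw [List.getD_eq_getElem _ _ (by omega)]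
        exact hpt.2.2 _ (List.getElem_mem _) x (by simp)
      rw [hsub, List.take_append_of_le_length (by omega), hgd,
        min_assoc, min_comm x _, min_eq_left hle]

lemma floordiv_len_step (m : Int) (n : Nat) (hm : 1 ≤ m) (h : m ≤ (n : Int)) :
    PySem.Int.floordiv ((n - m.toNat : Nat) : Int) m
      = PySem.Int.floordiv (n : Int) m - 1 := by
  have hcast : ((n - m.toNat : Nat) : Int) = (n : Int) - m := by omega
  have hg := (PySem.Int.floordiv_eq_iff_of_pos (show (0:Int) < m by omega)).mp
    (rfl : PySem.Int.floordiv (n : Int) m = _)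
  rw [hcast, (PySem.Int.floordiv_eq_iff_of_pos (by omega))]
  constructor
  · nlinarith [hg.1]
  · nlinarith [hg.2]

lemma gterms_step (k m : Int) (s : List Int) (hm : 1 ≤ m) (h : m ≤ (s.length : Int)) :
    gterms k m s = min k (s.getD (s.length - m.toNat) 0) :: gterms k m (s.take (s.length - m.toNat)) := by
  have hg1 : 1 ≤ PySem.Int.floordiv (s.length : Int) m := by
    rw [PySem.Int.le_floordiv_iff_mul_le (by omega)]; omega
  have hgm := (PySem.Int.floordiv_eq_iff_of_pos (show (0:Int) < m by omega)).mp
    (rfl : PySem.Int.floordiv ((s.length : Nat) : Int) m = _)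
  have htn : (PySem.Int.floordiv (s.length : Int) m).toNat
      = (PySem.Int.floordiv (s.length : Int) m - 1).toNat + 1 := by omega
  have hlen' : (s.take (s.length - m.toNat)).length = s.length - m.toNat := by
    simp only [List.length_take]; omega
  unfold gterms
  rw [htn, List.range_succ_eq_map, List.map_cons, List.map_map]
  congr 1
  · -- head: the j = 0 term is the minimum of the first group
    have h1 : ((s.length : Int) - (((0 : Nat) : Int) + 1) * m) = (s.length : Int) - m := by
      push_cast; ring
    rw [h1, PySem.List.pyGet?_eq_some_getElem s (by omega) (by omega)]
    rw [List.getD_eq_getElem _ _ (by omega)]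
    simp only [Option.getD_some]
    have h2 : ((s.length : Int) - m).toNat = s.length - m.toNat := by omega
    simp only [h2]
  · -- tail: the remaining groups are the groups of the truncated list
    rw [hlen', floordiv_len_step m s.length hm h]
    apply List.map_congr_left
    intro j hj
    have hjlt : (j : Int) < PySem.Int.floordiv (s.length : Int) m - 1 := by
      have := List.mem_range.mp hj
      omega
    have hj2g : ((j : Int) + 1 + 1) * m ≤ PySem.Int.floordiv (s.length : Int) m * m :=
      mul_le_mul_of_nonneg_right (by omega) (by omega)
    have hidx0 : 0 ≤ (s.length : Int) - ((j : Int) + 1 + 1) * m := by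
      have := hgm.1; linarith
    have hmm : ((j : Int) + 1 + 1) * m = m + ((j : Int) + 1) * m := by ring
    have hjm : 0 < ((j : Int) + 1) * m := mul_pos (by positivity) (by omega)
    have hcl : ((s.length - m.toNat : Nat) : Int) = (s.length : Int) - m := by omega
    have hidx1 : (s.length : Int) - ((j : Int) + 1 + 1) * m < ((s.length - m.toNat : Nat) : Int) := by
      rw [hcl]; linarith
    have hidx1' : (s.length : Int) - ((j : Int) + 1 + 1) * m < (s.length : Int) := by
      linarith
    have hidx2 : ((s.length - m.toNat : Nat) : Int) - ((j : Int) + 1) * m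
        = (s.length : Int) - ((j : Int) + 1 + 1) * m := by
      rw [hcl]; ring
    have hidx3 : ((s.length : Int) - (((j + 1 : Nat) : Int) + 1) * m)
        = (s.length : Int) - ((j : Int) + 1 + 1) * m := by
      push_cast; ring
    simp only [Function.comp_apply, hidx2, hidx3]
    rw [PySem.List.pyGet?_eq_some_getElem _ hidx0 hidx1',
      PySem.List.pyGet?_eq_some_getElem _ hidx0 (by rw [hlen']; exact_mod_cast hidx1)]
    simp only [Option.getD_some]
    congr 1
    rw [List.getElem_take]

lemma gterms_nil (k m : Int) (s : List Int) (hm : 1 ≤ m) (h : ¬ m ≤ (s.length : Int)) :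
    gterms k m s = [] := by
  have : PySem.Int.floordiv (s.length : Int) m = 0 := by
    rw [PySem.Int.floordiv_eq_iff_of_pos (by omega)]
    constructor <;> [simp; omega]
  unfold gterms
  rw [this]
  simp

lemma whileA_eq (k m : Int) (hm : 1 ≤ m) : ∀ (fuel : Nat) (s : List Int) (ans : Int),
    s.Pairwise (· ≤ ·) → s.length < fuel →
    whileA k m fuel s ans = ans + m * (gterms k m s).sum := by
  intro fuel
  induction fuel with
  | zero => intro s ans _ h; omega
  | succ fuel ih =>
    intro s ans hp hlen
    rw [whileA]
    by_cases h : m ≤ (s.length : Int)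
    · rw [if_pos h]
      rw [popLoopA_eq m.toNat s k hp (by omega) (by omega)]
      rw [ih _ _ (hp.sublist (List.take_sublist _ _)) (by simp; omega)]
      rw [gterms_step k m s hm h]
      simp only [List.sum_cons]
      ring
    · rw [if_neg h, gterms_nil k m s hm h]
      simp

-- ===== VERDICT (by name: the statement is the Claim_ definition above) =====
theorem solution_spec : Claim_equal_solution := by
  intro k m score _ hpre
  unfold Spec_solution solution
  rw [alt_eq_gterms k m score hpre]
  simpa using whileA_eq k m hpre (score.length + 1) _ 0
    (PySem.List.sorted_pairwise score (fun x => x))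
    (by rw [PySem.List.length_sorted]; omega)
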